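-- pv_equiv track=rewrite | github.com/Shwetha-75/CodingProblems-leetcode_-_HackerRank | MathProblems/1266MinimumTimeVisitingAllPoints.py | helper
-- ===== SOURCE A (Python) =====
-- def helper(prev:list[int],curr:list[int],m2:int):
--         count=0
--         while prev[0]<m2 and prev[1]<m2:
--             prev[0]+=1
--             prev[1]+=1
--             count+=1
--         diff1=abs(prev[0]-curr[0])
--         diff2=abs(prev[1]-curr[1])
--         if diff1==diff2:
--            count+=diff1
--         else:
--             count+=diff1+diff2
--
--         return count
-- ===== SOURCE B (Python) =====
-- def helper(prev: list[int], curr: list[int], m2: int):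
--     # closed-form step count instead of incrementing loop (does not mutate prev)
--     steps = max(0, m2 - max(prev[0], prev[1]))
--     d1 = abs(prev[0] + steps - curr[0])
--     d2 = abs(prev[1] + steps - curr[1])
--     return steps + (d1 if d1 == d2 else d1 + d2)
-- ===== Notes on version B (the rewrite author's own statement) =====
-- stated objective: faster
-- what changed: The while loop that advances prev diagonally one step at a time is replaced by the closed form steps = max(0, m2 - max(prev[0], prev[1])); B also does not mutate prev.
import Mathlib
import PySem

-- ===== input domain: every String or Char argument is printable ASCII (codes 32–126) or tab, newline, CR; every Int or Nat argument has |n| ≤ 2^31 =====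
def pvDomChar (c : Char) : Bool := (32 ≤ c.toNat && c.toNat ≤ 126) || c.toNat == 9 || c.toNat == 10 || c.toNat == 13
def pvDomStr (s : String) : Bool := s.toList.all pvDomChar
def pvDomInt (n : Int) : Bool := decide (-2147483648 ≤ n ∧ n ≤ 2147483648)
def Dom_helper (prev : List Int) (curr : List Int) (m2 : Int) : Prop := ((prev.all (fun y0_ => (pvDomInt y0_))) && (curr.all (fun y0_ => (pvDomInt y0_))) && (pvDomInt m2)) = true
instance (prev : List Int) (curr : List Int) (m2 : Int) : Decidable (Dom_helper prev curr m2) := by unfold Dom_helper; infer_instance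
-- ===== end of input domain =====

-- B replaces A's step-by-step diagonal advance loop by the closed form
-- max(0, m2 - max(prev[0], prev[1])) (O(1) vs O(m2)). Python A mutates prev in
-- place (B does not); the equivalence proved here is about the return value only.

-- ===== PORT A =====
-- A's while loop: advance both coordinates by 1 while both are < m2, counting steps.
def helperLoopA (p0 p1 m2 count : Int) : Int × Int × Int :=
  if p0 < m2 ∧ p1 < m2 then helperLoopA (p0 + 1) (p1 + 1) m2 (count + 1)
  else (p0, p1, count)
termination_by (m2 - p0).toNat
decreasing_by omega

def helper (prev : List Int) (curr : List Int) (m2 : Int) : Int :=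
  -- Pre_helper guarantees the four indexings are in range (Python raises otherwise)
  let p0 := (PySem.List.pyGet? prev 0).getD 0
  let p1 := (PySem.List.pyGet? prev 1).getD 0
  let r := helperLoopA p0 p1 m2 0
  let diff1 := |r.1 - (PySem.List.pyGet? curr 0).getD 0|
  let diff2 := |r.2.1 - (PySem.List.pyGet? curr 1).getD 0|
  if diff1 = diff2 then r.2.2 + diff1 else r.2.2 + (diff1 + diff2)

-- ===== PORT B =====
def helper_alt (prev : List Int) (curr : List Int) (m2 : Int) : Int :=
  let steps := max 0 (m2 - max ((PySem.List.pyGet? prev 0).getD 0) ((PySem.List.pyGet? prev 1).getD 0))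
  let d1 := |(PySem.List.pyGet? prev 0).getD 0 + steps - (PySem.List.pyGet? curr 0).getD 0|
  let d2 := |(PySem.List.pyGet? prev 1).getD 0 + steps - (PySem.List.pyGet? curr 1).getD 0|
  steps + (if d1 = d2 then d1 else d1 + d2)

-- ===== PRECONDITION & SPEC =====
-- Pre_ excludes only inputs where Python A raises IndexError (a list with fewer than 2 elements).
def Pre_helper (prev : List Int) (curr : List Int) (m2 : Int) : Prop :=
  2 ≤ prev.length ∧ 2 ≤ curr.length
instance (prev : List Int) (curr : List Int) (m2 : Int) : Decidable (Pre_helper prev curr m2) := by unfold Pre_helper; infer_instance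
def pvWitness_helper : List Int × List Int × Int := ([0, 1], [3, 2], 4)

def Spec_helper (prev : List Int) (curr : List Int) (m2 : Int) (out : Int) : Prop := out = helper_alt prev curr m2
instance (prev : List Int) (curr : List Int) (m2 : Int) (out : Int) : Decidable (Spec_helper prev curr m2 out) := by unfold Spec_helper; infer_instance

-- ===== CLAIM (what is proved, stated in full; the proofs are below) =====
def Claim_equal_helper : Prop := ∀ (prev : List Int) (curr : List Int) (m2 : Int), Dom_helper prev curr m2 → Pre_helper prev curr m2 → Spec_helper prev curr m2 (helper prev curr m2)

-- ===== LEMMAS AND PROOFS =====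
theorem helperLoopA_closed_aux (m2 : Int) (n : Nat) :
    ∀ p0 p1 count : Int, (m2 - p0).toNat ≤ n →
      helperLoopA p0 p1 m2 count =
        (p0 + max 0 (m2 - max p0 p1), p1 + max 0 (m2 - max p0 p1), count + max 0 (m2 - max p0 p1)) := by
  induction n with
  | zero =>
      intro p0 p1 count hn
      rw [helperLoopA, if_neg (by omega)]
      have : max 0 (m2 - max p0 p1) = 0 := by omega
      simp [this]
  | succ n ih =>
      intro p0 p1 count hn
      by_cases h : p0 < m2 ∧ p1 < m2
      · rw [helperLoopA, if_pos h, ih (p0 + 1) (p1 + 1) (count + 1) (by omega)]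
        simp only [Prod.mk.injEq]
        refine ⟨by omega, by omega, by omega⟩
      · rw [helperLoopA, if_neg h]
        have : max 0 (m2 - max p0 p1) = 0 := by omega
        simp [this]

theorem helperLoopA_closed (p0 p1 m2 count : Int) :
    helperLoopA p0 p1 m2 count =
      (p0 + max 0 (m2 - max p0 p1), p1 + max 0 (m2 - max p0 p1), count + max 0 (m2 - max p0 p1)) :=
  helperLoopA_closed_aux m2 (m2 - p0).toNat p0 p1 count le_rfl

-- ===== VERDICT (by name: the statement is the Claim_ definition above) =====
theorem helper_spec : Claim_equal_helper := by
  intro prev curr m2 _ _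
  unfold Spec_helper
  simp only [helper, helper_alt, helperLoopA_closed]
  set a0 := (PySem.List.pyGet? prev 0).getD 0
  set a1 := (PySem.List.pyGet? prev 1).getD 0
  set c0 := (PySem.List.pyGet? curr 0).getD 0
  set c1 := (PySem.List.pyGet? curr 1).getD 0
  set s := max 0 (m2 - max a0 a1)
  simp only [Int.zero_add]
  split_ifs with h1 h2 h2 <;> omega
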